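-- pv_equiv track=rewrite | github.com/ragz743/CPTS_355_PostScript_Compiler | psip.py | custom_tokenizer
-- ===== SOURCE A (Python) =====
-- def custom_tokenizer(input):
--   tokens = []
--   cur = ''
--   inside_string = False
--   inside_block = 0
--
--   for i in range(len(input)):
--     # Go over each character in input
--     character = input[i]
--     # If we are inside a string (i.e. inside the parentheses)
--     if inside_string is True:
--       cur += character
--       if character == ')':
--         tokens.append(cur)
--         cur = ''
--         inside_string = False
--     # If we are inside a code block (i.e. inside the curly brackets)
--     elif inside_block > 0:
--       cur += character
--       if character == '{':
--         inside_block += 1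
--       elif character == '}':
--         inside_block -= 1
--         if inside_block == 0:
--           tokens.append(cur)
--           cur = ''
--     else: # If we are not inside a string
--       if character.isspace(): # Is character a space
--         if cur != '':
--           tokens.append(cur)
--           cur = ''
--       elif character == '(':
--         if cur != '':
--           tokens.append(cur)
--         cur = '('
--         inside_string = True
--       elif character == '{':
--         if cur != '':
--           tokens.append(cur)
--         cur = '{'
--         inside_block = 1
--       else:
--         cur += character
--   # Append the final token to tokens and return
--   if cur != '':
--     tokens.append(cur)
--   return tokens
-- ===== SOURCE B (Python) =====
-- def custom_tokenizer(input):
--   # Index-driven scanner: slices out one whole token per outer step (no cur/flag state).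
--   tokens = []
--   i, n = 0, len(input)
--   while i < n:
--     c = input[i]
--     if c.isspace():
--       i += 1
--     elif c == '(':
--       j = input.find(')', i)
--       j = n if j == -1 else j + 1
--       tokens.append(input[i:j])
--       i = j
--     elif c == '{':
--       depth, j = 0, i
--       while j < n:
--         if input[j] == '{':
--           depth += 1
--         elif input[j] == '}':
--           depth -= 1
--         j += 1
--         if depth == 0:
--           break
--       tokens.append(input[i:j])
--       i = j
--     else:
--       j = i + 1
--       while j < n and not (input[j].isspace() or input[j] == '(' or input[j] == '{'):
--         j += 1
--       tokens.append(input[i:j])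
--       i = j
--   return tokens
-- ===== Notes on version B (the rewrite author's own statement) =====
-- stated objective: alternative
-- what changed: Replaced the per-character flag-based state machine (cur buffer, inside_string flag, inside_block counter) by an index-driven scanner that slices out one whole token per outer step with dedicated forward scans for strings, brace blocks and plain runs.
import Mathlib
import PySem

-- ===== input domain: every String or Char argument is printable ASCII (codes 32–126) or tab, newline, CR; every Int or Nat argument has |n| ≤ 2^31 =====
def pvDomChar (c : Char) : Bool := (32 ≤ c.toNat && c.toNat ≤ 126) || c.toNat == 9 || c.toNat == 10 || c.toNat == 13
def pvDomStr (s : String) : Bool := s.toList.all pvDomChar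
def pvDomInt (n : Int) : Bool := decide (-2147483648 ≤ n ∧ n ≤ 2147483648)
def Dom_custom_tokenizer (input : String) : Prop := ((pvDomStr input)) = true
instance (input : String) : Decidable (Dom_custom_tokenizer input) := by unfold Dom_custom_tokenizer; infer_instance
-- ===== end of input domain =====

-- B replaces A's flag-based per-character state machine by an index-free scanner that
-- slices out one whole token per step (alternative decomposition, same cost).


-- ===== PORT A =====
-- state: (tokens, cur, inside_string, inside_block); cur kept as List Char
def stepA (st : List String × List Char × Bool × Int) (character : Char) :
    List String × List Char × Bool × Int :=
  let (tokens, cur, inside_string, inside_block) := st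
  if inside_string = true then
    let cur := cur ++ [character]
    if character = ')' then (tokens ++ [String.mk cur], [], false, inside_block)
    else (tokens, cur, inside_string, inside_block)
  else if inside_block > 0 then
    let cur := cur ++ [character]
    if character = '{' then (tokens, cur, inside_string, inside_block + 1)
    else if character = '}' then
      let inside_block := inside_block - 1
      if inside_block = 0 then (tokens ++ [String.mk cur], [], inside_string, inside_block)
      else (tokens, cur, inside_string, inside_block)
    else (tokens, cur, inside_string, inside_block)
  else
    if PySem.Chars.isspace character then
      if cur ≠ [] then (tokens ++ [String.mk cur], [], inside_string, inside_block)
      else (tokens, cur, inside_string, inside_block)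
    else if character = '(' then
      ((if cur ≠ [] then tokens ++ [String.mk cur] else tokens), ['('], true, inside_block)
    else if character = '{' then
      ((if cur ≠ [] then tokens ++ [String.mk cur] else tokens), ['{'], inside_string, 1)
    else (tokens, cur ++ [character], inside_string, inside_block)

def finishA (st : List String × List Char × Bool × Int) : List String :=
  let (tokens, cur, _, _) := st
  if cur ≠ [] then tokens ++ [String.mk cur] else tokens

def custom_tokenizer (input : String) : List String :=
  finishA (input.toList.foldl stepA ([], [], false, 0))

-- ===== PORT B =====
-- scan forward to the first ')' (inclusive); (consumed chars, rest)
def scanStr : List Char → List Char × List Char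
  | [] => ([], [])
  | c :: rest =>
    if c = ')' then ([c], rest)
    else let (t, r) := scanStr rest; (c :: t, r)

-- scan forward keeping brace depth d, stop right after depth returns to 0
def scanBlk : List Char → Int → List Char × List Char
  | [], _ => ([], [])
  | c :: rest, d =>
    if c = '{' then let (t, r) := scanBlk rest (d + 1); (c :: t, r)
    else if c = '}' then
      if d = 1 then ([c], rest)
      else let (t, r) := scanBlk rest (d - 1); (c :: t, r)
    else let (t, r) := scanBlk rest d; (c :: t, r)

-- scan a plain run, stopping at whitespace, '(' or '{'
def scanRun : List Char → List Char × List Char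
  | [] => ([], [])
  | c :: rest =>
    if PySem.Chars.isspace c ∨ c = '(' ∨ c = '{' then ([], c :: rest)
    else let (t, r) := scanRun rest; (c :: t, r)

theorem scanStr_len (l : List Char) : (scanStr l).2.length ≤ l.length := by
  induction l with
  | nil => simp [scanStr]
  | cons c rest ih => simp only [scanStr]; split <;> simp <;> omega

theorem scanBlk_len (l : List Char) : ∀ d, (scanBlk l d).2.length ≤ l.length := by
  induction l with
  | nil => intro d; simp [scanBlk]
  | cons c rest ih =>
    intro d; simp only [scanBlk]
    split
    · have := ih (d + 1); simp; omega
    · split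
      · split
        · simp
        · have := ih (d - 1); simp; omega
      · have := ih d; simp; omega

theorem scanRun_len (l : List Char) : (scanRun l).2.length ≤ l.length := by
  induction l with
  | nil => simp [scanRun]
  | cons c rest ih => simp only [scanRun]; split <;> simp <;> omega

def tokB : List Char → List String
  | [] => []
  | c :: rest =>
    if PySem.Chars.isspace c then tokB rest
    else if c = '(' then
      String.mk ('(' :: (scanStr rest).1) :: tokB (scanStr rest).2
    else if c = '{' then
      String.mk ('{' :: (scanBlk rest 1).1) :: tokB (scanBlk rest 1).2
    else
      String.mk (c :: (scanRun rest).1) :: tokB (scanRun rest).2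
termination_by l => l.length
decreasing_by
  all_goals have h1 := scanStr_len rest
  all_goals have h2 := scanBlk_len rest 1
  all_goals have h3 := scanRun_len rest
  all_goals simp
  all_goals omega

def custom_tokenizer_alt (input : String) : List String := tokB input.toList

-- ===== PRECONDITION & SPEC =====
def Spec_custom_tokenizer (input : String) (out : List String) : Prop := out = custom_tokenizer_alt input
instance (input : String) (out : List String) : Decidable (Spec_custom_tokenizer input out) := by unfold Spec_custom_tokenizer; infer_instance

-- ===== CLAIM (what is proved, stated in full; the proofs are below) =====
def Claim_equal_custom_tokenizer : Prop := ∀ (input : String), Dom_custom_tokenizer input → Spec_custom_tokenizer input (custom_tokenizer input)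

-- ===== LEMMAS AND PROOFS =====

-- proof-side generalisation of tokB carrying A's pending plain-run buffer `cur`
def tokB' (cur : List Char) : List Char → List String
  | [] => if cur = [] then [] else [String.mk cur]
  | c :: rest =>
    if PySem.Chars.isspace c then
      (if cur = [] then [] else [String.mk cur]) ++ tokB' [] rest
    else if c = '(' then
      (if cur = [] then [] else [String.mk cur]) ++
        (String.mk ('(' :: (scanStr rest).1) :: tokB' [] (scanStr rest).2)
    else if c = '{' then
      (if cur = [] then [] else [String.mk cur]) ++
        (String.mk ('{' :: (scanBlk rest 1).1) :: tokB' [] (scanBlk rest 1).2)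
    else tokB' (cur ++ [c]) rest
termination_by l => l.length
decreasing_by
  all_goals have h1 := scanStr_len rest
  all_goals have h2 := scanBlk_len rest 1
  all_goals simp
  all_goals omega

-- string mode: the fold consumes exactly what scanStr scans
theorem loop_string (l : List Char) : ∀ (toks : List String) (cur : List Char), cur ≠ [] →
    finishA (l.foldl stepA (toks, cur, true, 0)) =
    finishA ((scanStr l).2.foldl stepA
      (toks ++ [String.mk (cur ++ (scanStr l).1)], [], false, 0)) := by
  induction l with
  | nil => intro toks cur h; simp [scanStr, finishA, h]
  | cons c rest ih =>
    intro toks cur h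
    by_cases hc : c = ')'
    · simp [scanStr, hc, stepA]
    · rw [List.foldl_cons]
      have hs : stepA (toks, cur, true, 0) c = (toks, cur ++ [c], true, 0) := by
        simp [stepA, hc]
      rw [hs, ih _ _ (by simp)]
      simp [scanStr, hc]

-- block mode: the fold consumes exactly what scanBlk scans
theorem loop_block (l : List Char) : ∀ (toks : List String) (cur : List Char) (d : Int),
    1 ≤ d → cur ≠ [] →
    finishA (l.foldl stepA (toks, cur, false, d)) =
    finishA ((scanBlk l d).2.foldl stepA
      (toks ++ [String.mk (cur ++ (scanBlk l d).1)], [], false, 0)) := by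
  induction l with
  | nil => intro toks cur d hd h; simp [scanBlk, finishA, h]
  | cons c rest ih =>
    intro toks cur d hd h
    rw [List.foldl_cons]
    by_cases hob : c = '{'
    · have hs : stepA (toks, cur, false, d) c = (toks, cur ++ [c], false, d + 1) := by
        simp [stepA, hob]; omega
      rw [hs, ih _ _ (d + 1) (by omega) (by simp)]
      simp [scanBlk, hob]
    · by_cases hcb : c = '}'
      · by_cases h1 : d = 1
        · have hs : stepA (toks, cur, false, d) c =
              (toks ++ [String.mk (cur ++ [c])], [], false, 0) := by
            subst h1; simp [stepA, hcb]
          rw [hs]; simp [scanBlk, hcb, hob, h1]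
        · have hs : stepA (toks, cur, false, d) c = (toks, cur ++ [c], false, d - 1) := by
            simp [stepA, hcb]
            rw [if_pos (show (0:Int) < d by omega), if_neg (show ¬(d-1:Int) = 0 by omega)]
          rw [hs, ih _ _ (d - 1) (by omega) (by simp)]
          simp [scanBlk, hcb, hob, h1]
      · have hs : stepA (toks, cur, false, d) c = (toks, cur ++ [c], false, d) := by
          simp [stepA, hcb, hob]; omega
        rw [hs, ih _ _ d hd (by simp)]
        simp [scanBlk, hcb, hob]

-- cons-shape equations for tokB and tokB'
theorem tokB_space {c : Char} (h : PySem.Chars.isspace c = true) (rest : List Char) :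
    tokB (c :: rest) = tokB rest := by
  rw [tokB, if_pos h]

theorem tokB_paren (rest : List Char) :
    tokB ('(' :: rest) = String.mk ('(' :: (scanStr rest).1) :: tokB (scanStr rest).2 := by
  rw [tokB, if_neg (by decide), if_pos rfl]

theorem tokB_brace (rest : List Char) :
    tokB ('{' :: rest) = String.mk ('{' :: (scanBlk rest 1).1) :: tokB (scanBlk rest 1).2 := by
  rw [tokB, if_neg (by decide), if_neg (by decide), if_pos rfl]

theorem tokB_other {c : Char} (h1 : ¬ PySem.Chars.isspace c = true) (h2 : c ≠ '(')
    (h3 : c ≠ '{') (rest : List Char) :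
    tokB (c :: rest) = String.mk (c :: (scanRun rest).1) :: tokB (scanRun rest).2 := by
  rw [tokB, if_neg h1, if_neg h2, if_neg h3]

theorem tokB'_space {c : Char} (h : PySem.Chars.isspace c = true) (cur rest : List Char) :
    tokB' cur (c :: rest) = (if cur = [] then [] else [String.mk cur]) ++ tokB' [] rest := by
  rw [tokB', if_pos h]

theorem tokB'_paren (cur rest : List Char) :
    tokB' cur ('(' :: rest) = (if cur = [] then [] else [String.mk cur]) ++
      (String.mk ('(' :: (scanStr rest).1) :: tokB' [] (scanStr rest).2) := by
  rw [tokB', if_neg (by decide), if_pos rfl]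

theorem tokB'_brace (cur rest : List Char) :
    tokB' cur ('{' :: rest) = (if cur = [] then [] else [String.mk cur]) ++
      (String.mk ('{' :: (scanBlk rest 1).1) :: tokB' [] (scanBlk rest 1).2) := by
  rw [tokB', if_neg (by decide), if_neg (by decide), if_pos rfl]

theorem tokB'_other {c : Char} (h1 : ¬ PySem.Chars.isspace c = true) (h2 : c ≠ '(')
    (h3 : c ≠ '{') (cur rest : List Char) :
    tokB' cur (c :: rest) = tokB' (cur ++ [c]) rest := by
  rw [tokB', if_neg h1, if_neg h2, if_neg h3]

-- normal mode: the whole fold computes tokB'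
theorem loop_main : ∀ (n : ℕ) (l : List Char), l.length < n → ∀ (toks : List String) (cur : List Char),
    finishA (l.foldl stepA (toks, cur, false, 0)) = toks ++ tokB' cur l := by
  intro n
  induction n with
  | zero => intro l hl; omega
  | succ m ih =>
    intro l hl toks cur
    match l with
    | [] => simp only [List.foldl_nil, finishA, tokB']; split <;> simp_all
    | c :: rest =>
      rw [List.foldl_cons]
      by_cases hsp : PySem.Chars.isspace c = true
      · have hs : stepA (toks, cur, false, 0) c =
            ((if cur = [] then toks else toks ++ [String.mk cur]), [], false, 0) := by
          simp [stepA, hsp]; split <;> simp_all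
        rw [hs, ih rest (by simp at hl; omega), tokB'_space hsp]
        split <;> simp
      · by_cases hc1 : c = '('
        · subst hc1
          have hs : stepA (toks, cur, false, 0) '(' =
              ((if cur = [] then toks else toks ++ [String.mk cur]), ['('], true, 0) := by
            simp [stepA, hsp]
          rw [hs, loop_string rest _ _ (by simp),
            ih (scanStr rest).2 (by have := scanStr_len rest; simp at hl; omega),
            tokB'_paren]
          split <;> simp
        · by_cases hc2 : c = '{'
          · subst hc2
            have hs : stepA (toks, cur, false, 0) '{' =
                ((if cur = [] then toks else toks ++ [String.mk cur]), ['{'], false, 1) := by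
              simp [stepA, hsp]
            rw [hs, loop_block rest _ _ 1 (by omega) (by simp),
              ih (scanBlk rest 1).2 (by have := scanBlk_len rest 1; simp at hl; omega),
              tokB'_brace]
            split <;> simp
          · have hs : stepA (toks, cur, false, 0) c = (toks, cur ++ [c], false, 0) := by
              simp [stepA, hsp, hc1, hc2]
            rw [hs, ih rest (by simp at hl; omega), tokB'_other hsp hc1 hc2]

-- a nonempty pending run buffer is flushed exactly where scanRun stops
theorem tokB'_run (rest : List Char) : ∀ (cur : List Char), cur ≠ [] →
    tokB' cur rest =
      String.mk (cur ++ (scanRun rest).1) :: tokB' [] (scanRun rest).2 := by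
  induction rest with
  | nil => intro cur h; simp [tokB', scanRun, h]
  | cons c rest ih =>
    intro cur h
    by_cases hsp : PySem.Chars.isspace c = true
    · have hr : scanRun (c :: rest) = ([], c :: rest) := by simp [scanRun, hsp]
      rw [hr, tokB'_space hsp, tokB'_space hsp]
      simp [h]
    · by_cases hc1 : c = '('
      · subst hc1
        have hr : scanRun ('(' :: rest) = ([], '(' :: rest) := by simp [scanRun]
        rw [hr, tokB'_paren, tokB'_paren]
        simp [h]
      · by_cases hc2 : c = '{'
        · subst hc2
          have hr : scanRun ('{' :: rest) = ([], '{' :: rest) := by simp [scanRun]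
          rw [hr, tokB'_brace, tokB'_brace]
          simp [h]
        · have hr : scanRun (c :: rest) = (c :: (scanRun rest).1, (scanRun rest).2) := by
            simp [scanRun, hsp, hc1, hc2]
          rw [tokB'_other hsp hc1 hc2, ih (cur ++ [c]) (by simp), hr]
          simp

-- tokB' with an empty buffer is tokB
theorem tokB'_nil : ∀ (n : ℕ) (l : List Char), l.length < n → tokB' [] l = tokB l := by
  intro n
  induction n with
  | zero => intro l hl; omega
  | succ m ih =>
    intro l hl
    match l with
    | [] => simp [tokB', tokB]
    | c :: rest =>
      by_cases hsp : PySem.Chars.isspace c = true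
      · rw [tokB'_space hsp, tokB_space hsp, ih rest (by simp at hl; omega)]
        simp
      · by_cases hc1 : c = '('
        · subst hc1
          rw [tokB'_paren, tokB_paren,
            ih (scanStr rest).2 (by have := scanStr_len rest; simp at hl; omega)]
          simp
        · by_cases hc2 : c = '{'
          · subst hc2
            rw [tokB'_brace, tokB_brace,
              ih (scanBlk rest 1).2 (by have := scanBlk_len rest 1; simp at hl; omega)]
            simp
          · rw [tokB'_other hsp hc1 hc2, tokB_other hsp hc1 hc2]
            simp only [List.nil_append]
            rw [tokB'_run rest [c] (by simp),
              ih (scanRun rest).2 (by have := scanRun_len rest; simp at hl; omega)]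
            simp

-- ===== VERDICT (by name: the statement is the Claim_ definition above) =====
theorem custom_tokenizer_spec : Claim_equal_custom_tokenizer := by
  intro input _
  unfold Spec_custom_tokenizer custom_tokenizer custom_tokenizer_alt
  rw [loop_main (input.toList.length + 1) input.toList (by omega),
    tokB'_nil (input.toList.length + 1) input.toList (by omega)]
  simp
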